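-- pv_equiv track=rewrite | github.com/ishizawa-hub/dfdb | scripts/extract-all-v4.py | cluster_work_lines
-- ===== SOURCE A (Python) =====
-- CLUSTER_GAP = 50   # Y-gap > this = new work cluster
--
-- def cluster_work_lines(work_lines):
--     """Y座標でクラスタリング → 各クラスタ = 1作品"""
--     if not work_lines:
--         return []
--     clusters = []
--     current = [work_lines[0]]
--     for wl in work_lines[1:]:
--         if wl['y'] - current[-1]['y'] > CLUSTER_GAP:
--             clusters.append(current)
--             current = [wl]
--         else:
--             current.append(wl)
--     clusters.append(current)
--     return clusters
-- ===== SOURCE B (Python) =====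
-- CLUSTER_GAP = 50   # Y-gap > this = new work cluster
--
-- def cluster_work_lines(work_lines):
--     """Y座標でクラスタリング → 各クラスタ = 1作品 (built back-to-front)"""
--     clusters = []
--     for wl in reversed(work_lines):
--         if clusters and clusters[0][0]['y'] - wl['y'] <= CLUSTER_GAP:
--             clusters[0].insert(0, wl)
--         else:
--             clusters.insert(0, [wl])
--     return clusters
-- ===== Notes on version B (the rewrite author's own statement) =====
-- stated objective: alternative
-- what changed: B builds the clusters back-to-front: it iterates over work_lines in reverse and either prepends the line to the first (earliest) cluster or opens a new cluster at the front, replacing A's forward loop with its (clusters, current) accumulator and final flush.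
import Mathlib
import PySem

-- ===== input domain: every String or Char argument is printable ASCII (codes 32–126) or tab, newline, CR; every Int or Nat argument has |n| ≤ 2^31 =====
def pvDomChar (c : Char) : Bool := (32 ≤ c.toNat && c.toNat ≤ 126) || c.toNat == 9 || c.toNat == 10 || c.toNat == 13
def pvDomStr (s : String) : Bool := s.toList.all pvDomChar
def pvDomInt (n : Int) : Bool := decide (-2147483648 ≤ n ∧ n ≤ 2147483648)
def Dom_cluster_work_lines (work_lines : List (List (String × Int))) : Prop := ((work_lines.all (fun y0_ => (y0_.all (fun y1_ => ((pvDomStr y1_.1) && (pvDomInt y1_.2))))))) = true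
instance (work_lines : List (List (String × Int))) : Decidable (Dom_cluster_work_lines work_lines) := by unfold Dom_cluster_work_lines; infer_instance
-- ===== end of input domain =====

-- B builds the clusters back-to-front (reversed iteration, prepending), replacing A's
-- forward accumulator loop; objective: alternative decomposition, same cost.
-- (B mutates nothing; A mutates only its own locals — return values are what is compared.)

-- ===== PORT A =====
-- wl['y'] on the association-list dict; Pre_ guarantees the key is present wherever A reads it.
def pvY (d : List (String × Int)) : Int := ((PySem.Dict.mk d).get? "y").getD 0

def pvStepA (acc : List (List (List (String × Int))) × List (List (String × Int)))
    (wl : List (String × Int)) :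
    List (List (List (String × Int))) × List (List (String × Int)) :=
  if pvY wl - pvY ((PySem.List.pyGet? acc.2 (-1)).getD []) > 50 then
    (acc.1 ++ [acc.2], [wl])
  else
    (acc.1, acc.2 ++ [wl])

def cluster_work_lines (work_lines : List (List (String × Int))) : List (List (List (String × Int))) :=
  match work_lines with
  | [] => []
  | w0 :: rest =>
    let st := rest.foldl pvStepA ([], [w0])
    st.1 ++ [st.2]

-- ===== PORT B =====
def pvStepB (wl : List (String × Int)) (clusters : List (List (List (String × Int)))) :
    List (List (List (String × Int))) :=
  match clusters with
  | [] => [[wl]]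
  | c :: cs =>
    if pvY ((PySem.List.pyGet? c 0).getD []) - pvY wl ≤ 50 then (wl :: c) :: cs
    else [wl] :: c :: cs

def cluster_work_lines_alt (work_lines : List (List (String × Int))) : List (List (List (String × Int))) :=
  work_lines.foldr pvStepB []

-- ===== PRECONDITION & SPEC =====
-- Python A (and B) raises KeyError when some line lacks the 'y' key and the list has ≥ 2
-- elements (with ≤ 1 element no 'y' is ever read); Pre_ excludes exactly the missing-key inputs.
def Pre_cluster_work_lines (work_lines : List (List (String × Int))) : Prop :=
  work_lines.length ≤ 1 ∨ ∀ d ∈ work_lines, ((PySem.Dict.mk d).get? "y").isSome = true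
instance (work_lines : List (List (String × Int))) : Decidable (Pre_cluster_work_lines work_lines) := by unfold Pre_cluster_work_lines; infer_instance

def pvWitness_cluster_work_lines : (List (List (String × Int))) :=
  [[("y", 10)], [("y", 20)], [("y", 100)]]

def Spec_cluster_work_lines (work_lines : List (List (String × Int))) (out : List (List (List (String × Int)))) : Prop := out = cluster_work_lines_alt work_lines
instance (work_lines : List (List (String × Int))) (out : List (List (List (String × Int)))) : Decidable (Spec_cluster_work_lines work_lines out) := by unfold Spec_cluster_work_lines; infer_instance

-- ===== CLAIM (what is proved, stated in full; the proofs are below) =====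
def Claim_equal_cluster_work_lines : Prop := ∀ (work_lines : List (List (String × Int))), Dom_cluster_work_lines work_lines → Pre_cluster_work_lines work_lines → Spec_cluster_work_lines work_lines (cluster_work_lines work_lines)

-- ===== LEMMAS AND PROOFS =====

-- Reference recursion: cluster `rest`, `cur` being the open cluster whose last element is `prev`.
def pvClRef (prev : List (String × Int)) (cur : List (List (String × Int)))
    (rest : List (List (String × Int))) : List (List (List (String × Int))) :=
  match rest with
  | [] => [cur]
  | wl :: rest' =>
    if pvY wl - pvY prev > 50 then cur :: pvClRef wl [wl] rest'
    else pvClRef wl (cur ++ [wl]) rest'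

-- A's foldl equals the reference recursion.
lemma pvA_loop (rest : List (List (String × Int))) :
    ∀ (clusters : List (List (List (String × Int)))) (cur : List (List (String × Int)))
      (prev : List (String × Int)), PySem.List.pyGet? cur (-1) = some prev →
      (rest.foldl pvStepA (clusters, cur)).1 ++ [(rest.foldl pvStepA (clusters, cur)).2]
        = clusters ++ pvClRef prev cur rest := by
  induction rest with
  | nil => intro clusters cur prev _; simp [pvClRef]
  | cons wl rest' ih =>
    intro clusters cur prev hlast
    simp only [List.foldl_cons, pvClRef]
    by_cases hgap : pvY wl - pvY prev > 50
    · rw [show rest'.foldl pvStepA (pvStepA (clusters, cur) wl)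
            = rest'.foldl pvStepA (clusters ++ [cur], [wl]) by
          simp [pvStepA, hlast, hgap]]
      rw [ih (clusters ++ [cur]) [wl] wl (by rw [PySem.List.pyGet?_neg_one]; rfl)]
      simp [hgap]
    · rw [show rest'.foldl pvStepA (pvStepA (clusters, cur) wl)
            = rest'.foldl pvStepA (clusters, cur ++ [wl]) by
          simp [pvStepA, hlast, hgap]]
      rw [ih clusters (cur ++ [wl]) wl (PySem.List.pyGet?_neg_one_append_singleton cur wl)]
      simp [hgap]

-- Merging an open cluster (ending in `prev`) into an already-built group list.
def pvMerge (cur : List (List (String × Int))) (prev : List (String × Int))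
    (groups : List (List (List (String × Int)))) : List (List (List (String × Int))) :=
  match groups with
  | [] => [cur]
  | c :: cs =>
    if pvY ((PySem.List.pyGet? c 0).getD []) - pvY prev ≤ 50 then (cur ++ c) :: cs
    else cur :: c :: cs

lemma pvStepB_eq_merge (wl : List (String × Int)) (gs : List (List (List (String × Int)))) :
    pvStepB wl gs = pvMerge [wl] wl gs := by
  cases gs with
  | nil => rfl
  | cons c cs => simp [pvStepB, pvMerge]

-- The reference recursion equals B's foldr merged into the open cluster.
lemma pvClRef_eq_merge (rest : List (List (String × Int))) :
    ∀ (prev : List (String × Int)) (cur : List (List (String × Int))),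
      pvClRef prev cur rest = pvMerge cur prev (rest.foldr pvStepB []) := by
  induction rest with
  | nil => intro prev cur; rfl
  | cons wl rest' ih =>
    intro prev cur
    simp only [List.foldr_cons, pvClRef, pvStepB_eq_merge]
    by_cases hgap : pvY wl - pvY prev > 50
    · rw [if_pos hgap, ih wl [wl]]
      cases hgs : rest'.foldr pvStepB [] with
      | nil => simp [pvMerge]; omega
      | cons c cs =>
        simp only [pvMerge]
        split_ifs with h1 <;>
          simp [PySem.List.pyGet?, PySem.List.pyIdx?] <;> omega
    · rw [if_neg hgap, ih wl (cur ++ [wl])]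
      cases hgs : rest'.foldr pvStepB [] with
      | nil => simp [pvMerge]; omega
      | cons c cs =>
        simp only [pvMerge]
        split_ifs with h1 <;>
          simp [PySem.List.pyGet?, PySem.List.pyIdx?] <;> omega

-- ===== VERDICT (by name: the statement is the Claim_ definition above) =====
theorem cluster_work_lines_spec : Claim_equal_cluster_work_lines := by
  intro work_lines _ _
  unfold Spec_cluster_work_lines
  cases work_lines with
  | nil => rfl
  | cons w0 rest =>
    show (rest.foldl pvStepA ([], [w0])).1 ++ [(rest.foldl pvStepA ([], [w0])).2] = _
    rw [pvA_loop rest [] [w0] w0 (by rw [PySem.List.pyGet?_neg_one]; rfl)]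
    rw [pvClRef_eq_merge rest w0 [w0]]
    show _ = (w0 :: rest).foldr pvStepB []
    rw [List.foldr_cons, pvStepB_eq_merge]
    simp
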